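-- pv_equiv track=rewrite | github.com/gbaldessari/learning-code | Python/Programación/Clase 6/4.py | anillos
-- ===== SOURCE A (Python) =====
-- def anillos(num):
--     anillos = 0
--     num = list(num)
--     for i in range(len(num)):
--         if num[i] == '0' or num[i] == '6' or num[i] == '9':
--             anillos += 1
--         elif num[i] == '8':
--             anillos += 2
--         else:
--             anillos += 0
--     return anillos
-- ===== SOURCE B (Python) =====
-- def anillos(num):
--     # Staged passes: one independent str.count scan per ring-bearing digit,
--     # combined arithmetically; no loop, no accumulator, no histogram.
--     return num.count('0') + num.count('6') + num.count('9') + 2 * num.count('8')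
-- ===== Notes on version B (the rewrite author's own statement) =====
-- stated objective: idiomatic
-- what changed: Replaced A's single indexed loop with branch cascade and running accumulator by four independent str.count scans (one per ring-bearing digit) combined in a closed arithmetic expression; no loop, branch or accumulator in B.
import Mathlib
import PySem

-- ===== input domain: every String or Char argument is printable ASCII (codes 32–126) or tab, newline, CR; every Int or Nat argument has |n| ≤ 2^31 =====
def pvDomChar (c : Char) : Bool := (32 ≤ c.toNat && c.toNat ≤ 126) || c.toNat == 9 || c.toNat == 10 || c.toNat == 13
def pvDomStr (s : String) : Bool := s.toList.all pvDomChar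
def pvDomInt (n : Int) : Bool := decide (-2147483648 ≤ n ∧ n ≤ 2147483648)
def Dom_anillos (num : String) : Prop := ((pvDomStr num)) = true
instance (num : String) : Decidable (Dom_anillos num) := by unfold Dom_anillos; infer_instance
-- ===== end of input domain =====

-- B replaces A's single indexed loop with branch cascade and accumulator by four independent
-- str.count scans combined arithmetically (idiomatic; no loop, branch or accumulator in B).

-- ===== PORT A =====
-- literal port: loop over range(len(num)) indexing num[i]; indices are always in range, so pyGetD's default is never used
def anillos (num : String) : Int :=
  let numL := num.toList
  (PySem.List.pyRange 0 (numL.length : Int) 1).foldl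
    (fun a i =>
      let c := PySem.List.pyGetD numL i ' '
      if c = '0' ∨ c = '6' ∨ c = '9' then a + 1
      else if c = '8' then a + 2
      else a + 0) 0

-- ===== PORT B =====
def anillos_alt (num : String) : Int :=
  (PySem.Str.count num "0" : Int) + (PySem.Str.count num "6" : Int)
    + (PySem.Str.count num "9" : Int) + 2 * (PySem.Str.count num "8" : Int)

-- ===== PRECONDITION & SPEC =====
def Spec_anillos (num : String) (out : Int) : Prop := out = anillos_alt num
instance (num : String) (out : Int) : Decidable (Spec_anillos num out) := by unfold Spec_anillos; infer_instance

-- ===== CLAIM (what is proved, stated in full; the proofs are below) =====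
def Claim_equal_anillos : Prop := ∀ (num : String), Dom_anillos num → Spec_anillos num (anillos num)

-- ===== LEMMAS AND PROOFS =====
theorem anillos_foldl_eq_counts (xs : List Char) (a : Int) :
    xs.foldl (fun a c =>
      if c = '0' ∨ c = '6' ∨ c = '9' then a + 1
      else if c = '8' then a + 2
      else a + 0) a
    = a + xs.count '0' + xs.count '6' + xs.count '9' + 2 * xs.count '8' := by
  induction xs generalizing a with
  | nil => simp
  | cons c xs ih =>
    simp only [List.foldl_cons, ih, List.count_cons]
    by_cases h0 : c = '0' <;> by_cases h6 : c = '6' <;> by_cases h9 : c = '9' <;>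
      by_cases h8 : c = '8' <;> simp_all <;> ring

-- Python str.count with a single-character needle is the character count of the code-point list.
theorem count_go_single (c : Char) (l : List Char) (fuel acc : Nat) (h : l.length ≤ fuel) :
    PySem.Chars.count.go [c] fuel l acc = acc + l.count c := by
  induction l generalizing fuel acc with
  | nil => cases fuel <;> simp [PySem.Chars.count.go]
  | cons x t ih =>
    cases fuel with
    | zero => simp at h
    | succ f =>
      simp only [List.length_cons, Nat.succ_le_succ_iff] at h
      rw [PySem.Chars.count.go]
      by_cases hc : c = x
      · subst hc
        simp [List.isPrefixOf, ih _ _ h]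
        omega
      · have hp : ([c].isPrefixOf (x :: t)) = false := by
          simp [List.isPrefixOf]
          first | exact fun hh => hc hh.symm | exact hc
        simp [hp, ih _ _ h, List.count_cons]
        intro hh; exact hc hh.symm

theorem chars_count_single (s : List Char) (c : Char) :
    PySem.Chars.count s [c] = s.count c := by
  simp [PySem.Chars.count, count_go_single c s s.length 0 le_rfl]

-- ===== VERDICT (by name: the statement is the Claim_ definition above) =====
theorem anillos_spec : Claim_equal_anillos := by
  intro num _
  unfold Spec_anillos anillos anillos_alt
  simp only [PySem.Str.count_eq,
    show ("0" : String).toList = ['0'] from rfl, show ("6" : String).toList = ['6'] from rfl,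
    show ("9" : String).toList = ['9'] from rfl, show ("8" : String).toList = ['8'] from rfl,
    chars_count_single]
  rw [PySem.List.foldl_pyRange_zero_pyGetD' num.toList ' '
        (fun a c => if c = '0' ∨ c = '6' ∨ c = '9' then a + 1
                    else if c = '8' then a + 2 else a + 0) 0,
      anillos_foldl_eq_counts]
  push_cast
  ring
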